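-- pv_equiv track=rewrite | github.com/Sean-Blank/DRTSparsing | modules/utils.py | get_same_lemma
-- ===== SOURCE A (Python) =====
-- def get_same_lemma(packed):
--     """
--     get matrix that indicates which lemmas are the same
--     """
--     lemmas = packed[0][1]
--     seps = packed[1]
--     combs = []
--     for j in range(len(seps) - 1):
--         s = seps[j]
--         e = seps[j + 1]
--         comb = []
--         past_lemmas = []
--         for i, li in enumerate(lemmas[s + 1:e]):
--             if li in past_lemmas:
--                 continue
--             past_lemmas.append(li)
--             comb.append([])
--             for k, lk in enumerate(lemmas[s + 1:e]):
--                 if lk == li: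
--                     comb[-1].append(k)
--         # 每句话中相同的单词放一起了
--         combs.append(comb)
--     return combs
-- ===== SOURCE B (Python) =====
-- def get_same_lemma(packed):
--     """
--     get matrix that indicates which lemmas are the same
--     """
--     lemmas = packed[0][1]
--     seps = packed[1]
--     combs = []
--     for j in range(len(seps) - 1):
--         seg = lemmas[seps[j] + 1:seps[j + 1]]
--         groups = {}
--         for k, lk in enumerate(seg):
--             groups.setdefault(lk, []).append(k)
--         combs.append(list(groups.values()))
--     return combs
-- ===== Notes on version B (the rewrite author's own statement) =====
-- stated objective: faster
-- what changed: Per segment, A rescans the whole segment for every distinct lemma (nested loops); B makes one pass building an insertion-ordered dict lemma -> index list and returns its values.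
import Mathlib
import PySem

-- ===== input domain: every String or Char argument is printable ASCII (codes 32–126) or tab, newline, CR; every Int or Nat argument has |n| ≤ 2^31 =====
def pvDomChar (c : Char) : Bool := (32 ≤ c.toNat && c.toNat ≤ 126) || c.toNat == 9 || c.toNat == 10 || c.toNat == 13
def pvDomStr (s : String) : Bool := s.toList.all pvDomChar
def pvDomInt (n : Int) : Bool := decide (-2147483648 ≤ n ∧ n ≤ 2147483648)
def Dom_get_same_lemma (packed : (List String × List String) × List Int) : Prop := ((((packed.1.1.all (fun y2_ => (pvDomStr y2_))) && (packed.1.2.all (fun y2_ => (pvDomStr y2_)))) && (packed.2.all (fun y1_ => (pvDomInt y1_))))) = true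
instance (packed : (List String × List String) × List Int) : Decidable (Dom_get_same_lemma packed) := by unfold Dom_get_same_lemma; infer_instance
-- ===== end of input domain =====

-- B replaces A's quadratic per-segment rescans by one pass with an insertion-ordered dict
-- lemma -> index list (O(n) per segment); same return value everywhere.

-- ===== PORT A =====
def get_same_lemma (packed : (List String × List String) × List Int) : List (List (List Int)) :=
  let lemmas := packed.1.2
  let seps := packed.2
  (PySem.List.pyRange 0 ((seps.length : Int) - 1) 1).foldl (fun combs j =>
    let s := PySem.List.pyGetD seps j 0        -- j is always in range, so getD is exact
    let e := PySem.List.pyGetD seps (j + 1) 0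
    let seg := PySem.List.slice lemmas (some (s + 1)) (some e)
    let inner := (PySem.List.enumerate seg).foldl
      (fun (st : List String × List (List Int)) p =>
        if st.1.contains p.2 then st
        else (st.1 ++ [p.2],
              st.2 ++ [(PySem.List.enumerate seg).foldl
                (fun acc q => if q.2 == p.2 then acc ++ [q.1] else acc) []]))
      ([], [])
    combs ++ [inner.2]) []

-- ===== PORT B =====
def get_same_lemma_alt (packed : (List String × List String) × List Int) : List (List (List Int)) :=
  let lemmas := packed.1.2
  let seps := packed.2
  (PySem.List.pyRange 0 ((seps.length : Int) - 1) 1).foldl (fun combs j =>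
    let seg := PySem.List.slice lemmas
      (some (PySem.List.pyGetD seps j 0 + 1)) (some (PySem.List.pyGetD seps (j + 1) 0))
    let groups := (PySem.List.enumerate seg).foldl
      (fun (d : PySem.Dict String (List Int)) p => d.modify p.2 [] (fun v => v ++ [p.1]))
      PySem.Dict.empty
    combs ++ [groups.values]) []

-- ===== PRECONDITION & SPEC =====
def Spec_get_same_lemma (packed : (List String × List String) × List Int) (out : List (List (List Int))) : Prop := out = get_same_lemma_alt packed
instance (packed : (List String × List String) × List Int) (out : List (List (List Int))) : Decidable (Spec_get_same_lemma packed out) := by unfold Spec_get_same_lemma; infer_instance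

-- ===== CLAIM (what is proved, stated in full; the proofs are below) =====
def Claim_equal_get_same_lemma : Prop := ∀ (packed : (List String × List String) × List Int), Dom_get_same_lemma packed → Spec_get_same_lemma packed (get_same_lemma packed)

-- ===== LEMMAS AND PROOFS =====

-- indices (as produced by enumerate) of the occurrences of c in seg
def pvIdxs (seg : List String) (c : String) : List Int :=
  ((PySem.List.enumerate seg).filter (fun q => q.2 == c)).map (fun q => q.1)

-- Set.update only appends
lemma pv_prefix_update {α : Type} [BEq α] (s : List α) (l : List α) :
    s <+: PySem.Set.update s l := by
  induction l generalizing s with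
  | nil => simp [PySem.Set.update]
  | cons x xs ih =>
    have h1 : PySem.Set.update s (x :: xs) = PySem.Set.update (PySem.Set.add s x) xs := rfl
    rw [h1]
    refine List.IsPrefix.trans ?_ (ih (PySem.Set.add s x))
    by_cases h : s.contains x
    · simp [PySem.Set.add, h]
    · simp [PySem.Set.add, h]

-- the A-side dedup loop with a paired accumulator, characterised
lemma pv_foldl_dedup_pair {α β : Type} [BEq α] (g : α → β) (l : List α)
    (s0 : List α) (c0 : List β) :
    l.foldl (fun st x => if st.1.contains x then st else (st.1 ++ [x], st.2 ++ [g x])) (s0, c0)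
      = (PySem.Set.update s0 l,
         c0 ++ ((PySem.Set.update s0 l).drop s0.length).map g) := by
  induction l generalizing s0 c0 with
  | nil => simp [PySem.Set.update]
  | cons x xs ih =>
    have hupd : PySem.Set.update s0 (x :: xs) = PySem.Set.update (PySem.Set.add s0 x) xs := rfl
    by_cases h : s0.contains x
    · have hadd : PySem.Set.add s0 x = s0 := by simp [PySem.Set.add, h]
      simp only [List.foldl_cons, h, if_pos, hupd, hadd]
      exact ih s0 c0
    · have hadd : PySem.Set.add s0 x = s0 ++ [x] := by simp [PySem.Set.add, h]
      simp only [List.foldl_cons, h, Bool.false_eq_true, ite_false]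
      rw [ih (s0 ++ [x]) (c0 ++ [g x]), hupd, hadd]
      refine Prod.ext rfl ?_
      obtain ⟨t, ht⟩ := pv_prefix_update (s0 ++ [x]) xs
      rw [← ht]
      have h1 : ((s0 ++ [x]) ++ t).drop s0.length = [x] ++ t := by
        rw [List.append_assoc, List.drop_left]
      have h2 : ((s0 ++ [x]) ++ t).drop (s0 ++ [x]).length = t := List.drop_left
      rw [h1, h2]
      simp

-- A's per-segment loop produces the groups of the distinct lemmas, in first-occurrence order
lemma pv_segA (seg : List String) :
    ((PySem.List.enumerate seg).foldl
      (fun (st : List String × List (List Int)) p =>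
        if st.1.contains p.2 then st
        else (st.1 ++ [p.2],
              st.2 ++ [(PySem.List.enumerate seg).foldl
                (fun acc q => if q.2 == p.2 then acc ++ [q.1] else acc) []]))
      ([], [])).2
    = (PySem.Set.ofList seg).map (pvIdxs seg) := by
  have hstep : ∀ (st : List String × List (List Int)), ∀ p ∈ PySem.List.enumerate seg,
      (fun (st : List String × List (List Int)) (p : Int × String) =>
        if st.1.contains p.2 then st
        else (st.1 ++ [p.2],
              st.2 ++ [(PySem.List.enumerate seg).foldl
                (fun acc q => if q.2 == p.2 then acc ++ [q.1] else acc) []])) st p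
    = (if st.1.contains p.2 then st else (st.1 ++ [p.2], st.2 ++ [pvIdxs seg p.2])) := by
    intro st p _
    simp only [PySem.List.foldl_append_if]
    simp [pvIdxs]
  rw [PySem.List.foldl_congr_mem _ _
    (fun (st : List String × List (List Int)) x =>
      if st.1.contains x.2 then st else (st.1 ++ [x.2], st.2 ++ [pvIdxs seg x.2])) _ hstep]
  have hmap : (PySem.List.enumerate seg).foldl
      (fun (st : List String × List (List Int)) p =>
        if st.1.contains p.2 then st else (st.1 ++ [p.2], st.2 ++ [pvIdxs seg p.2]))
      ([], [])
    = ((PySem.List.enumerate seg).map (fun p => p.2)).foldl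
      (fun (st : List String × List (List Int)) x =>
        if st.1.contains x then st else (st.1 ++ [x], st.2 ++ [pvIdxs seg x]))
      ([], []) := by rw [List.foldl_map]
  rw [hmap, PySem.List.map_snd_enumerate,
    pv_foldl_dedup_pair (pvIdxs seg) seg [] []]
  simp [PySem.Set.ofList_eq_foldl, PySem.Set.update]

-- a dict with nodup keys lists its values as getD over its keys
lemma pv_values_eq_map_getD {κ ν : Type} [BEq κ] [LawfulBEq κ]
    (d : PySem.Dict κ ν) (d0 : ν) (h : d.keys.Nodup) :
    d.values = d.keys.map (fun k => d.getD k d0) := by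
  have hv : d.values = d.items.map (fun p => p.2) := rfl
  have hk : d.keys = d.items.map (fun p => p.1) := rfl
  rw [hv, hk, List.map_map]
  refine List.map_congr_left ?_
  intro p hp
  exact (PySem.Dict.getD_of_mem_items d (by rw [Prod.mk.eta]; exact hp) h d0).symm

-- B's per-segment dict has the distinct lemmas as keys …
lemma pv_segB_keys (seg : List String) :
    ((PySem.List.enumerate seg).foldl
      (fun (d : PySem.Dict String (List Int)) p => d.modify p.2 [] (fun v => v ++ [p.1]))
      PySem.Dict.empty).keys = PySem.Set.ofList seg := by
  rw [PySem.Dict.keys_foldl_modify_key (PySem.List.enumerate seg) (fun p => p.2) []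
    (fun _ p v => v ++ [p.1]) PySem.Dict.empty]
  rw [PySem.List.map_snd_enumerate]
  simp [PySem.Set.ofList_eq_foldl, PySem.Set.update, PySem.Dict.keys, PySem.Dict.empty]

-- … and maps each lemma to its index list
lemma pv_segB_getD (seg : List String) (c : String) :
    ((PySem.List.enumerate seg).foldl
      (fun (d : PySem.Dict String (List Int)) p => d.modify p.2 [] (fun v => v ++ [p.1]))
      PySem.Dict.empty).getD c [] = pvIdxs seg c := by
  have hswap : (PySem.List.enumerate seg).foldl
      (fun (d : PySem.Dict String (List Int)) p => d.modify p.2 [] (fun v => v ++ [p.1]))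
      PySem.Dict.empty
    = ((PySem.List.enumerate seg).map Prod.swap).foldl
      (fun (d : PySem.Dict String (List Int)) p => d.modify p.1 [] (fun v => v ++ [p.2]))
      PySem.Dict.empty := by rw [List.foldl_map]; rfl
  rw [hswap, PySem.Dict.getD_foldl_modify_append]
  simp only [PySem.Dict.getD_empty, List.nil_append, pvIdxs]
  rw [List.filter_map, List.map_map]
  rfl

-- the per-segment results agree
lemma pv_seg_eq (seg : List String) :
    ((PySem.List.enumerate seg).foldl
      (fun (st : List String × List (List Int)) p =>
        if st.1.contains p.2 then st
        else (st.1 ++ [p.2],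
              st.2 ++ [(PySem.List.enumerate seg).foldl
                (fun acc q => if q.2 == p.2 then acc ++ [q.1] else acc) []]))
      ([], [])).2
    = ((PySem.List.enumerate seg).foldl
        (fun (d : PySem.Dict String (List Int)) p => d.modify p.2 [] (fun v => v ++ [p.1]))
        PySem.Dict.empty).values := by
  rw [pv_segA]
  rw [pv_values_eq_map_getD _ ([] : List Int)
    (by rw [pv_segB_keys]; exact PySem.Set.nodup_ofList seg)]
  rw [pv_segB_keys]
  refine List.map_congr_left ?_
  intro c _
  rw [pv_segB_getD]

-- ===== VERDICT (by name: the statement is the Claim_ definition above) =====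
theorem get_same_lemma_spec : Claim_equal_get_same_lemma := by
  intro packed _
  unfold Spec_get_same_lemma get_same_lemma get_same_lemma_alt
  simp only []
  rw [PySem.List.foldl_append_singleton_eq_map, PySem.List.foldl_append_singleton_eq_map]
  simp only [List.nil_append]
  refine List.map_congr_left ?_
  intro j _
  exact pv_seg_eq _
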